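-- pv_equiv track=rewrite | github.com/hooneyskywalker0127/coding-test-practice | 프로그래머스/0/181860. 빈 배열에 추가， 삭제하기/빈 배열에 추가， 삭제하기.py | solution
-- ===== SOURCE A (Python) =====
-- def solution(arr, flag):
--     answer = []
--     for a in range(len(arr)):
--         if flag[a] == True:
--             answer.extend([arr[a]] * (arr[a] * 2))
--
--         else:
--             del answer[-arr[a]:]
--     return answer
-- ===== SOURCE B (Python) =====
-- def solution(arr, flag):
--     # Run-length stack of (value, count) blocks; deletes trim counts,
--     # the concrete list is built once at the end.
--     segs = []   # stack of (value, count), count > 0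
--     total = 0
--     for x, f in zip(arr, flag):
--         if f:
--             if x > 0:
--                 segs.append((x, 2 * x))
--                 total += 2 * x
--         else:
--             drop = min(x, total)
--             total -= drop
--             while drop > 0:
--                 v, c = segs[-1]
--                 if c <= drop:
--                     segs.pop()
--                     drop -= c
--                 else:
--                     segs[-1] = (v, c - drop)
--                     drop = 0
--     out = []
--     for v, c in segs:
--         out += [v] * c
--     return out
-- ===== Notes on version B (the rewrite author's own statement) =====
-- stated objective: alternative
-- what changed: Replaces the materialised answer list (extend with 2*x copies, delete tail slices) by a run-length stack of (value,count) segments whose counts are trimmed on delete and which is expanded into the concrete list only once at the end; Pre_ restricts to the task's natural domain, positive counts at delete (flag False) positions, where 'del answer[-x:]' really means 'delete the last x elements'.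
-- outside the precondition, e.g. on solution([1, 0], [True, False]): A returns [], B returns [1, 1]; on solution([1, -1], [True, False]): A returns [1], B returns [1, 1]
import Mathlib
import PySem

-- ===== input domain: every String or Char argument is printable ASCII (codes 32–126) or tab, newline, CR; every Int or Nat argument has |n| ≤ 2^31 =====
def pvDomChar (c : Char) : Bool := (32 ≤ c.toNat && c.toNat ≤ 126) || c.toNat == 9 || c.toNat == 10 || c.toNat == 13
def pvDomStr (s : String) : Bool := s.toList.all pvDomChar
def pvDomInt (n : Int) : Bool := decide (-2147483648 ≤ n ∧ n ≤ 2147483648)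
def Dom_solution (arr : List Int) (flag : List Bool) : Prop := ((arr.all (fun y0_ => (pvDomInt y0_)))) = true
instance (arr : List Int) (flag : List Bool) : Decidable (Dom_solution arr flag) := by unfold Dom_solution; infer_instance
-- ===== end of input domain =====

-- B replaces A's materialised answer list by a run-length stack of (value,count)
-- segments, trimmed on delete and expanded into the concrete list once at the end;
-- equal return value proved on Pre_ (flag at least as long as arr, delete counts positive).


-- ===== PORT A =====
-- for a in range(len(arr)): if flag[a] == True: answer.extend([arr[a]] * (arr[a]*2))
--                           else: del answer[-arr[a]:]          (leaves answer[:-arr[a]])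
def solution (arr : List Int) (flag : List Bool) : List Int :=
  (PySem.List.pyRange 0 (arr.length : Int) 1).foldl
    (fun answer a =>
      if PySem.List.pyGetD flag a false then
        answer ++ List.replicate (PySem.List.pyGetD arr a 0 * 2).toNat (PySem.List.pyGetD arr a 0)
      else
        PySem.List.slice answer none (some (-(PySem.List.pyGetD arr a 0)))) []

-- ===== PORT B =====
-- B's trimming while-loop; the Lean stack keeps the top at the HEAD (Python keeps
-- it at the end).  The [] case with positive drop is where Python's segs[-1]
-- raises IndexError (reachable only outside Pre_).
def altTrim : Int → List (Int × Int) → List (Int × Int)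
  | _, [] => []
  | drop, (v, c) :: t =>
    if drop ≤ 0 then (v, c) :: t
    else if c ≤ drop then altTrim (drop - c) t
    else (v, c - drop) :: t

-- B's main loop over zip(arr, flag); state = (segment stack, virtual length)
def altLoop : List (Int × Bool) → List (Int × Int) × Int → List (Int × Int) × Int
  | [], st => st
  | (x, f) :: rest, (segs, total) =>
    if f then
      if 0 < x then altLoop rest ((x, 2 * x) :: segs, total + 2 * x)
      else altLoop rest (segs, total)
    else
      let drop := min x total
      altLoop rest (altTrim drop segs, total - drop)

def solution_alt (arr : List Int) (flag : List Bool) : List Int :=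
  -- final expansion: for v, c in segs: out += [v] * c   (stack reversed back to Python order)
  ((altLoop (arr.zip flag) ([], 0)).1).reverse.foldl
    (fun out vc => out ++ List.replicate vc.2.toNat vc.1) []

-- ===== PRECONDITION & SPEC =====
-- A raises IndexError on flag[a] when flag is shorter than arr; beyond that, Pre_
-- restricts to the task's natural domain: positive counts at delete (flag False)
-- positions, where 'del answer[-x:]' really means 'delete the last x elements'
-- (for x = 0 it removes the whole list, for x < 0 an unrelated tail; B removes
-- nothing there).
def Pre_solution (arr : List Int) (flag : List Bool) : Prop :=
  arr.length ≤ flag.length ∧ ∀ p ∈ arr.zip flag, p.2 = false → 1 ≤ p.1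
instance (arr : List Int) (flag : List Bool) : Decidable (Pre_solution arr flag) := by unfold Pre_solution; infer_instance
def pvWitness_solution : List Int × List Bool := ([1, 2], [true, false])

def Spec_solution (arr : List Int) (flag : List Bool) (out : List Int) : Prop := out = solution_alt arr flag
instance (arr : List Int) (flag : List Bool) (out : List Int) : Decidable (Spec_solution arr flag out) := by unfold Spec_solution; infer_instance

-- ===== CLAIM (what is proved, stated in full; the proofs are below) =====
def Claim_equal_solution : Prop := ∀ (arr : List Int) (flag : List Bool), Dom_solution arr flag → Pre_solution arr flag → Spec_solution arr flag (solution arr flag)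

-- ===== LEMMAS AND PROOFS =====

-- expansion of B's stack (head = top) into the concrete list, oldest segment first
def expandE : List (Int × Int) → List Int
  | [] => []
  | (v, c) :: t => expandE t ++ List.replicate c.toNat v

theorem foldl_rev_expand (s : List (Int × Int)) (acc : List Int) :
    s.reverse.foldl (fun out vc => out ++ List.replicate vc.2.toNat vc.1) acc = acc ++ expandE s := by
  induction s generalizing acc with
  | nil => simp [expandE]
  | cons p t ih => cases p with
    | mk v c => simp [expandE, List.foldl_append, ih]

theorem expand_trim (s : List (Int × Int)) (d : Int) (hd : 0 ≤ d)
    (hle : d ≤ ((expandE s).length : Int)) (hpos : ∀ p ∈ s, 0 < p.2) :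
    expandE (altTrim d s) = (expandE s).take ((expandE s).length - d.toNat) ∧
      ∀ p ∈ altTrim d s, 0 < p.2 := by
  induction s generalizing d with
  | nil =>
    simp [expandE] at hle ⊢
    simp [altTrim, expandE]
  | cons p t ih =>
    obtain ⟨v, c⟩ := p
    have hc : 0 < c := hpos (v, c) (by simp)
    have hpt : ∀ q ∈ t, 0 < q.2 := fun q hq => hpos q (by simp [hq])
    have hlenE : (expandE ((v, c) :: t)).length = (expandE t).length + c.toNat := by
      simp [expandE]
    by_cases hd0 : d ≤ 0
    · have hd' : d = 0 := le_antisymm hd0 hd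
      subst hd'
      constructor
      · simp [altTrim, List.take_length]
      · intro q hq
        rw [show altTrim 0 ((v, c) :: t) = (v, c) :: t from by simp [altTrim]] at hq
        exact hpos q hq
    · by_cases hcd : c ≤ d
      · have hle' : d - c ≤ ((expandE t).length : Int) := by omega
        obtain ⟨h1, h2⟩ := ih (d - c) (by omega) hle' hpt
        constructor
        · simp only [altTrim, if_neg hd0, if_pos hcd, expandE]
          rw [h1]
          rw [List.take_append_of_le_length (by simp; omega)]
          congr 1
          simp only [List.length_append, List.length_replicate]
          omega
        · rw [show altTrim d ((v, c) :: t) = altTrim (d - c) t from by simp [altTrim, hd0, hcd]]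
          exact h2
      · constructor
        · simp only [altTrim, if_neg hd0, if_neg hcd, expandE]
          rw [List.take_append]
          rw [List.take_of_length_le (by simp; omega), List.take_replicate]
          congr 2
          simp only [List.length_append, List.length_replicate]
          omega
        · intro q hq
          simp only [altTrim, if_neg hd0, if_neg hcd] at hq
          rcases List.mem_cons.mp hq with h | h
          · subst h; simp; omega
          · exact hpt q h

theorem main_loop (l : List (Int × Bool)) (segs : List (Int × Int)) (total : Int)
    (ans : List Int) (hans : ans = expandE segs) (htot : total = (ans.length : Int))
    (hpos : ∀ p ∈ segs, 0 < p.2) (hdel : ∀ p ∈ l, p.2 = false → 1 ≤ p.1) :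
    l.foldl (fun answer (p : Int × Bool) =>
        if p.2 then answer ++ List.replicate (p.1 * 2).toNat p.1
        else PySem.List.slice answer none (some (-p.1))) ans
      = expandE (altLoop l (segs, total)).1 := by
  induction l generalizing segs total ans with
  | nil => simpa [altLoop] using hans
  | cons p rest ih =>
    obtain ⟨x, f⟩ := p
    have hdel' : ∀ p ∈ rest, p.2 = false → 1 ≤ p.1 := fun q hq => hdel q (by simp [hq])
    cases f with
    | true =>
      by_cases hx : 0 < x
      · have h2x : (x * 2).toNat = (2 * x).toNat := by ring_nf
        simp only [List.foldl_cons, if_pos, altLoop, if_pos hx]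
        refine ih ((x, 2 * x) :: segs) (total + 2 * x) _ ?_ ?_ ?_ hdel'
        · simp [expandE, hans, h2x]
        · simp; omega
        · intro q hq
          rcases List.mem_cons.mp hq with h | h
          · subst h; simpa using hx
          · exact hpos q h
      · have h0 : (x * 2).toNat = 0 := by omega
        simp only [List.foldl_cons, if_pos, h0, List.replicate_zero, List.append_nil,
          altLoop, if_neg hx]
        exact ih segs total ans hans htot hpos hdel'
    | false =>
      have hx1 : 1 ≤ x := hdel (x, false) (by simp) rfl
      have hxt : -x = -((x.toNat : Nat) : Int) := by omega
      have hslice : PySem.List.slice ans none (some (-x)) = ans.take (ans.length - x.toNat) := by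
        rw [hxt, PySem.List.slice_to_neg_natCast ans x.toNat (by omega)]
      have hmin : (min x total).toNat = min x.toNat ans.length := by omega
      simp only [List.foldl_cons, Bool.false_eq_true, if_false, altLoop]
      obtain ⟨h1, h2⟩ := expand_trim segs (min x total)
        (by omega) (by rw [← hans]; omega) hpos
      refine ih _ _ _ ?_ ?_ h2 hdel'
      · rw [h1, ← hans, hslice, hmin]
        congr 1
        omega
      · rw [hslice]
        simp [List.length_take]
        omega

-- ===== VERDICT (by name: the statement is the Claim_ definition above) =====
theorem solution_spec : Claim_equal_solution := by
  intro arr flag _ hpre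
  show solution arr flag = solution_alt arr flag
  unfold solution solution_alt
  obtain ⟨hp, hdel⟩ := hpre
  have hzlen : (arr.zip flag).length = arr.length := by
    simp [List.length_zip]; omega
  have hcast : (arr.length : Int) = ((arr.zip flag).length : Int) := by rw [hzlen]
  rw [hcast]
  have hbody : ∀ (acc : List Int), ∀ j ∈ PySem.List.pyRange 0 (((arr.zip flag).length : Nat) : Int) 1,
      (fun answer a =>
        if PySem.List.pyGetD flag a false then
          answer ++ List.replicate (PySem.List.pyGetD arr a 0 * 2).toNat (PySem.List.pyGetD arr a 0)
        else
          PySem.List.slice answer none (some (-(PySem.List.pyGetD arr a 0)))) acc j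
      = (fun answer j =>
          (fun answer (p : Int × Bool) =>
            if p.2 then answer ++ List.replicate (p.1 * 2).toNat p.1
            else PySem.List.slice answer none (some (-p.1))) answer
            (PySem.List.pyGetD (arr.zip flag) j (0, false))) acc j := by
    intro acc j hj
    rw [PySem.List.mem_pyRange_one] at hj
    have hjz : j < ((arr.zip flag).length : Int) := hj.2
    have hjarr : j < (arr.length : Int) := by omega
    have hjflag : j < (flag.length : Int) := by omega
    beta_reduce
    rw [PySem.List.pyGetD_eq_getElem (arr.zip flag) (0, false) hj.1 (by omega),
        PySem.List.pyGetD_eq_getElem arr 0 hj.1 (by omega),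
        PySem.List.pyGetD_eq_getElem flag false hj.1 (by omega),
        List.getElem_zip]
  rw [PySem.List.foldl_congr_mem _ _ _ [] hbody]
  rw [PySem.List.foldl_pyRange_zero_pyGetD' (arr.zip flag) (0, false)
    (fun answer (p : Int × Bool) =>
      if p.2 then answer ++ List.replicate (p.1 * 2).toNat p.1
      else PySem.List.slice answer none (some (-p.1))) []]
  rw [main_loop (arr.zip flag) [] 0 [] (by simp [expandE]) (by simp) (by simp)
    (fun q hq => hdel q hq)]
  rw [foldl_rev_expand]
  simp
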